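-- pv_equiv track=rewrite | github.com/ghawk0/ai-final-proj | mattstuff/solution/createdivs.py | create_divisions
-- ===== SOURCE A (Python) =====
-- def create_divisions(player_dict, div_sizes):
--
--     player_by_rating = {}
--
--     for player in player_dict:
--         player_tuple = (player, player_dict[player])
--         rating = player_tuple[1][3]
--
--         if rating in player_by_rating:
--             player_by_rating[rating].append(player_tuple)
--         else:
--             rating_list = []
--             rating_list.append(player_tuple)
--             player_by_rating[rating] = rating_list
--
--     ordered_players = []
--     for rating in sorted(player_by_rating.keys()):
--         for player_tuple in player_by_rating[rating]:
--             ordered_players.append(player_tuple)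
--
--     player_dict_by_division = {}
--
--     count = 0
--
--     for div in range(len(div_sizes)):
--         player_dict_by_division[div] = {}
--
--         for i in range(div_sizes[div]):
--             player_num, player_info = ordered_players[count]
--             player_dict_by_division[div][player_num] = player_info
--             count += 1
--
--     return player_dict_by_division
-- ===== SOURCE B (Python) =====
-- def create_divisions(player_dict, div_sizes):
--     players = iter(sorted(player_dict.items(), key=lambda t: t[1][3]))
--     return {div: dict([next(players) for _ in range(size)])
--             for div, size in enumerate(div_sizes)}
-- ===== Notes on version B (the rewrite author's own statement) =====
-- stated objective: simpler
-- what changed: Replaces the bucket-by-rating dict plus sorted-keys double flatten and the manual count/inner-index loop with one stable sort of the items by rating followed by a dict comprehension that deals the next size players to each division from an iterator.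
import Mathlib
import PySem

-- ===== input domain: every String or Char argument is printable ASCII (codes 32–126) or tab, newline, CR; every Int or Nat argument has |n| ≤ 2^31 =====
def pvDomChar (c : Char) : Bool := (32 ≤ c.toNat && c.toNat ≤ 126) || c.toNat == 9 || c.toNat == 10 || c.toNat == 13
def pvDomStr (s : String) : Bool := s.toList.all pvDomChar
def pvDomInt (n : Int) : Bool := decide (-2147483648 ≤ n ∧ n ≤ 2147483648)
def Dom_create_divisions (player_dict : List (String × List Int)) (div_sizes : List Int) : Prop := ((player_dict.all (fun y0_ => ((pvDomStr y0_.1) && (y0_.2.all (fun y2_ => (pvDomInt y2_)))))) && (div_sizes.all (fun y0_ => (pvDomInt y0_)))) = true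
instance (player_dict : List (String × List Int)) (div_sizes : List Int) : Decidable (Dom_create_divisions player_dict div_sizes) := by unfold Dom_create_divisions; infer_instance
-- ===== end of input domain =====

-- B replaces A's bucket-by-rating dict + sorted-keys double flatten + manual count loop by one
-- stable sort of the items followed by slicing consecutive chunks per division (objective: simpler).

-- ===== PORT A =====
-- rating = player_tuple[1][3]; Pre_ guarantees the info list has ≥ 4 entries, so the default is never used
def pvRating (p : String × List Int) : Int := PySem.List.pyGetD p.2 3 0

-- 'for player in player_dict' iterates the dict's keys; Pre_ (distinct keys, the dict representation
-- invariant) makes (player, player_dict[player]) the pair itself, so the fold runs over the pairs.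
def create_divisions (player_dict : List (String × List Int)) (div_sizes : List Int) : List (Int × List (String × List Int)) :=
  let player_by_rating : PySem.Dict Int (List (String × List Int)) :=
    player_dict.foldl
      (fun d player_tuple =>
        let rating := pvRating player_tuple
        if d.contains rating then
          d.modify rating [] (fun l => l ++ [player_tuple])
        else
          d.insert rating [player_tuple])
      PySem.Dict.empty
  let ordered_players : List (String × List Int) :=
    (PySem.List.sorted player_by_rating.keys (fun r => r) false).foldl
      (fun acc rating => acc ++ player_by_rating.getD rating []) []
  let final :=
    (PySem.List.pyRange 0 (PySem.List.len div_sizes) 1).foldl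
      (fun (st : PySem.Dict Int (PySem.Dict String (List Int)) × Int) div =>
        (PySem.List.pyRange 0 (PySem.List.pyGetD div_sizes div 0) 1).foldl
          (fun st2 _i =>
            let pt := PySem.List.pyGetD ordered_players st2.2 ("", [])  -- Pre_ keeps the index in range
            (st2.1.modify div PySem.Dict.empty (fun inner => inner.insert pt.1 pt.2), st2.2 + 1))
          (st.1.insert div PySem.Dict.empty, st.2))
      (PySem.Dict.empty, 0)
  final.1.items.map (fun p => (p.1, p.2.items))

-- ===== PORT B =====
-- players = iter(sorted(...)); the iterator is ported as the position st.2 into the sorted list: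
-- '[next(players) for _ in range(size)]' is the next size elements (exhaustion raises in Python;
-- Pre_ keeps the position in range, where drop/take is exact).
def create_divisions_alt (player_dict : List (String × List Int)) (div_sizes : List Int) : List (Int × List (String × List Int)) :=
  let ordered := PySem.List.sorted player_dict pvRating false
  ((PySem.List.enumerate div_sizes).foldl
      (fun (st : List (Int × List (String × List Int)) × Nat) ds =>
        let chunk := (ordered.drop st.2).take ds.2.toNat
        (st.1 ++ [(ds.1, (PySem.Dict.ofList chunk).items)], st.2 + ds.2.toNat))
      ([], 0)).1

-- ===== PRECONDITION & SPEC =====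
-- Pre_ = exactly where the Python A returns normally on a genuine dict input:
--   * distinct keys: the first argument represents a Python dict (its representation invariant);
--   * every info list has ≥ 4 entries, else 'player_tuple[1][3]' raises IndexError;
--   * the requested division sizes fit in the player count, else 'ordered_players[count]' raises IndexError.
def Pre_create_divisions (player_dict : List (String × List Int)) (div_sizes : List Int) : Prop :=
  (player_dict.map Prod.fst).Nodup ∧
  (∀ p ∈ player_dict, 4 ≤ p.2.length) ∧
  (div_sizes.map (fun z => max z 0)).sum ≤ (player_dict.length : Int)
instance (player_dict : List (String × List Int)) (div_sizes : List Int) : Decidable (Pre_create_divisions player_dict div_sizes) := by unfold Pre_create_divisions; infer_instance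

def pvWitness_create_divisions : (List (String × List Int)) × List Int :=
  ([("amy", [0, 0, 0, 7]), ("bob", [0, 0, 0, 3]), ("cal", [0, 0, 0, 3])], [1, 2])

def Spec_create_divisions (player_dict : List (String × List Int)) (div_sizes : List Int) (out : List (Int × List (String × List Int))) : Prop := out = create_divisions_alt player_dict div_sizes
instance (player_dict : List (String × List Int)) (div_sizes : List Int) (out : List (Int × List (String × List Int))) : Decidable (Spec_create_divisions player_dict div_sizes out) := by unfold Spec_create_divisions; infer_instance

-- ===== CLAIM (what is proved, stated in full; the proofs are below) =====
def Claim_equal_create_divisions : Prop := ∀ (player_dict : List (String × List Int)) (div_sizes : List Int), Dom_create_divisions player_dict div_sizes → Pre_create_divisions player_dict div_sizes → Spec_create_divisions player_dict div_sizes (create_divisions player_dict div_sizes)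
-- ===== LEMMAS AND PROOFS =====

theorem pvInsertBy_append {α : Type} (before : α → α → Bool) (x : α) (ys zs : List α)
    (h : ∀ y ∈ ys, before x y = false) :
    PySem.List.insertBy before x (ys ++ zs) = ys ++ PySem.List.insertBy before x zs := by
  induction ys with
  | nil => simp
  | cons y ys ih =>
    have hy := h y (by simp)
    simp [PySem.List.insertBy, hy]
    exact ih (fun a ha => h a (by simp [ha]))

theorem pvInsertBy_head {α : Type} (before : α → α → Bool) (x z : α) (zs : List α)
    (h : before x z = true) :
    PySem.List.insertBy before x (z :: zs) = x :: z :: zs := by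
  simp [PySem.List.insertBy, h]

theorem pvInsertBy_all {α : Type} (before : α → α → Bool) (x : α) (ys : List α)
    (h : ∀ y ∈ ys, before x y = true) :
    PySem.List.insertBy before x ys = x :: ys := by
  cases ys with
  | nil => simp [PySem.List.insertBy]
  | cons z zs => exact pvInsertBy_head _ _ _ _ (h z (by simp))

theorem pvSorted_append_singleton {α κ : Type} [LinearOrder κ] (xs : List α) (x : α) (key : α → κ) :
    PySem.List.sorted (xs ++ [x]) key false
      = PySem.List.insertBy (fun a b => decide (key a < key b)) x (PySem.List.sorted xs key false) := by
  rw [PySem.List.sorted_eq_foldl_insertBy, PySem.List.sorted_eq_foldl_insertBy, List.foldl_append]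
  rfl

theorem pvFlatMap_mem (G : Int → List (String × List Int)) (x : String × List Int) (k : Int)
    (hk : pvRating x = k) :
    ∀ ks : List Int, ks.Pairwise (· < ·) → k ∈ ks →
    (∀ r ∈ ks, ∀ p ∈ G r, pvRating p = r) →
    ks.flatMap (fun r => G r ++ if k = r then [x] else [])
      = PySem.List.insertBy (fun a b => decide (pvRating a < pvRating b)) x (ks.flatMap G) := by
  intro ks
  induction ks with
  | nil => simp
  | cons r rest ih =>
    intro hpw hmem hG
    rcases List.mem_cons.mp hmem with hkr | hkrest
    · -- k = r : x appended at end of group r; rest untouched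
      subst hkr
      have hnot : ∀ y ∈ G k, (fun a b => decide (pvRating a < pvRating b)) x y = false := by
        intro y hy
        have := hG k (by simp) y hy
        simp [hk, this]
      have hrest_eq : rest.flatMap (fun r => G r ++ if k = r then [x] else []) = rest.flatMap G := by
        apply List.flatMap_congr
        intro r' hr'
        have : k ≠ r' := fun he => absurd ((List.pairwise_cons.mp hpw).1 r' hr') (by simp [he])
        simp [this]
      rw [List.flatMap_cons, List.flatMap_cons, hrest_eq,
        pvInsertBy_append _ _ _ _ hnot]
      cases hfl : rest.flatMap G with
      | nil => simp [PySem.List.insertBy]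
      | cons z zs =>
        have hz : pvRating x < pvRating z := by
          have hzmem : z ∈ rest.flatMap G := by simp [hfl]
          rcases List.mem_flatMap.mp hzmem with ⟨r', hr', hz'⟩
          have hlt : k < r' := (List.pairwise_cons.mp hpw).1 r' hr'
          have := hG r' (by simp [hr']) z hz'
          rw [hk, this]; exact hlt
        rw [pvInsertBy_head _ _ _ _ (by simp [hz])]
        simp
    · -- k ∈ rest, r < k : group r untouched, skip past it
      have hrk : r < k := (List.pairwise_cons.mp hpw).1 k hkrest
      have hne : k ≠ r := by omega
      have hnot : ∀ y ∈ G r, (fun a b => decide (pvRating a < pvRating b)) x y = false := by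
        intro y hy
        have := hG r (by simp) y hy
        simp [hk, this]; omega
      rw [List.flatMap_cons, List.flatMap_cons, pvInsertBy_append _ _ _ _ hnot,
        ih (List.pairwise_cons.mp hpw).2 hkrest (fun r' hr' => hG r' (by simp [hr']))]
      simp [hne]

theorem pvFlatMap_new (G : Int → List (String × List Int)) (x : String × List Int) (k : Int)
    (hk : pvRating x = k) (hGk : G k = []) :
    ∀ ks : List Int, ks.Pairwise (· < ·) → k ∉ ks →
    (∀ r ∈ ks, ∀ p ∈ G r, pvRating p = r) →
    (PySem.List.insertBy (fun a b => decide ((a : Int) < b)) k ks).flatMap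
        (fun r => G r ++ if k = r then [x] else [])
      = PySem.List.insertBy (fun a b => decide (pvRating a < pvRating b)) x (ks.flatMap G) := by
  intro ks
  induction ks with
  | nil => simp [PySem.List.insertBy, hGk]
  | cons r rest ih =>
    intro hpw hmem hG
    have hne : k ≠ r := fun he => hmem (by simp [he])
    by_cases hlt : k < r
    · rw [pvInsertBy_head _ _ _ _ (by simp [hlt])]
      have hG' : (r :: rest).flatMap (fun r' => G r' ++ if k = r' then [x] else [])
          = (r :: rest).flatMap G := by
        apply List.flatMap_congr
        intro r' hr'
        have : k ≠ r' := fun he => hmem (he ▸ hr')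
        simp [this]
      rw [List.flatMap_cons, hG']
      have hall : ∀ z ∈ (r :: rest).flatMap G,
          (fun a b => decide (pvRating a < pvRating b)) x z = true := by
        intro z hz
        rcases List.mem_flatMap.mp hz with ⟨r', hr', hz'⟩
        have hrr' : r ≤ r' := by
          rcases List.mem_cons.mp hr' with h | h
          · omega
          · have := (List.pairwise_cons.mp hpw).1 r' h; omega
        have := hG r' hr' z hz'
        simp [hk, this]; omega
      rw [pvInsertBy_all _ _ _ hall]
      simp [hGk]
    · have hrk : r < k := by omega
      rw [show PySem.List.insertBy (fun a b => decide ((a:Int) < b)) k (r :: rest)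
            = r :: PySem.List.insertBy (fun a b => decide ((a:Int) < b)) k rest by
          simp [PySem.List.insertBy, hlt]]
      have hnot : ∀ y ∈ G r, (fun a b => decide (pvRating a < pvRating b)) x y = false := by
        intro y hy
        have := hG r (by simp) y hy
        simp [hk, this]; omega
      rw [List.flatMap_cons, List.flatMap_cons, pvInsertBy_append _ _ _ _ hnot,
        ih (List.pairwise_cons.mp hpw).2 (fun h => hmem (by simp [h]))
          (fun r' hr' => hG r' (by simp [hr']))]
      simp [hne]

theorem pvMainOrder (pd : List (String × List Int)) :
    (PySem.List.sorted (PySem.Set.ofList (pd.map pvRating)) (fun r => r) false).flatMap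
        (fun r => pd.filter (fun p => pvRating p == r))
      = PySem.List.sorted pd pvRating false := by
  induction pd using List.reverseRecOn with
  | nil => simp [PySem.Set.ofList, PySem.Set.empty, PySem.List.sorted]
  | append_singleton pd x ih =>
    have hfil : ∀ r : Int, (pd ++ [x]).filter (fun p => pvRating p == r)
        = pd.filter (fun p => pvRating p == r) ++ (if pvRating x = r then [x] else []) := by
      intro r
      rw [List.filter_append]
      by_cases h : pvRating x = r <;> simp [h]
    have hG : ∀ ks : List Int, ∀ r ∈ ks, ∀ p ∈ pd.filter (fun p => pvRating p == r), pvRating p = r := by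
      intro ks r _ p hp
      simpa using (List.of_mem_filter hp)
    have hofl : PySem.Set.ofList ((pd ++ [x]).map pvRating)
        = PySem.Set.add (PySem.Set.ofList (pd.map pvRating)) (pvRating x) := by
      simp [PySem.Set.ofList, List.foldl_append]
    rw [pvSorted_append_singleton pd x pvRating, ← ih,
      List.flatMap_congr (fun r _ => hfil r), hofl]
    by_cases hmem : pvRating x ∈ pd.map pvRating
    · have hcont : PySem.Set.add (PySem.Set.ofList (pd.map pvRating)) (pvRating x)
          = PySem.Set.ofList (pd.map pvRating) := by
        simp [PySem.Set.add, (PySem.Set.mem_ofList _ _).mpr hmem]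
      rw [hcont]
      exact pvFlatMap_mem _ x (pvRating x) rfl _
        (PySem.List.sorted_ofList_pairwise_lt _)
        (by rw [PySem.List.mem_sorted]; exact (PySem.Set.mem_ofList _ _).mpr hmem)
        (hG _)
    · have hcont : PySem.Set.add (PySem.Set.ofList (pd.map pvRating)) (pvRating x)
          = PySem.Set.ofList (pd.map pvRating) ++ [pvRating x] := by
        simp [PySem.Set.add]
        intro a b hab he
        exact hmem (he ▸ List.mem_map_of_mem hab)
      rw [hcont, pvSorted_append_singleton _ (pvRating x) (fun r => r)]
      have hGk : pd.filter (fun p => pvRating p == pvRating x) = [] := by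
        rw [List.filter_eq_nil_iff]
        intro p hp hbe
        exact hmem (by rw [← show pvRating p = pvRating x from by simpa using hbe]; exact List.mem_map_of_mem hp)
      exact pvFlatMap_new _ x (pvRating x) rfl hGk _
        (PySem.List.sorted_ofList_pairwise_lt _)
        (fun h => hmem ((PySem.Set.mem_ofList _ _).mp ((PySem.List.mem_sorted _ _ _ _).mp h)))
        (hG _)

theorem pvGroupFold (pd : List (String × List Int)) :
    pd.foldl
      (fun d player_tuple =>
        let rating := pvRating player_tuple
        if d.contains rating then
          d.modify rating [] (fun l => l ++ [player_tuple])
        else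
          d.insert rating [player_tuple])
      PySem.Dict.empty
    = (pd.map (fun pt => (pvRating pt, pt))).foldl
        (fun d p => d.modify p.1 [] (fun l => l ++ [p.2])) PySem.Dict.empty := by
  rw [List.foldl_map]
  apply PySem.List.foldl_congr_mem
  intro d pt _
  cases h : d.contains (pvRating pt) with
  | true => simp [h]
  | false =>
    simp only [h, PySem.Dict.modify, if_false, Bool.false_eq_true]
    rw [PySem.Dict.getD_of_not_contains _ _ h]
    simp

theorem pvOrderedA (pd : List (String × List Int)) :
    (PySem.List.sorted
        ((pd.foldl
          (fun d player_tuple =>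
            let rating := pvRating player_tuple
            if d.contains rating then
              d.modify rating [] (fun l => l ++ [player_tuple])
            else
              d.insert rating [player_tuple])
          PySem.Dict.empty).keys) (fun r => r) false).foldl
      (fun acc rating => acc ++ (pd.foldl
          (fun d player_tuple =>
            let rating := pvRating player_tuple
            if d.contains rating then
              d.modify rating [] (fun l => l ++ [player_tuple])
            else
              d.insert rating [player_tuple])
          PySem.Dict.empty).getD rating []) []
    = PySem.List.sorted pd pvRating false := by
  rw [pvGroupFold]
  rw [PySem.List.foldl_append_eq_flatMap, List.nil_append]
  have hkeys : ((pd.map (fun pt => (pvRating pt, pt))).foldl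
      (fun d p => d.modify p.1 [] (fun l => l ++ [p.2])) PySem.Dict.empty).keys
      = PySem.Set.ofList (pd.map pvRating) := by
    have := PySem.Dict.keys_foldl_modify_key (pd.map (fun pt => (pvRating pt, pt)))
      (fun p => p.1) [] (fun _ p => fun l => l ++ [p.2]) PySem.Dict.empty
    simp only [List.map_map] at this
    rw [this]
    simp [PySem.Set.update, PySem.Set.ofList, PySem.Dict.keys_empty, Function.comp_def]
  have hgetD : ∀ r : Int, ((pd.map (fun pt => (pvRating pt, pt))).foldl
      (fun d p => d.modify p.1 [] (fun l => l ++ [p.2])) PySem.Dict.empty).getD r []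
      = pd.filter (fun p => pvRating p == r) := by
    intro r
    rw [PySem.Dict.getD_foldl_modify_append]
    simp [PySem.Dict.getD_empty, List.filter_map, Function.comp_def, List.map_map]
  rw [hkeys, List.flatMap_congr (fun r _ => hgetD r)]
  exact pvMainOrder pd

theorem pvInnerLoop (L : List (String × List Int)) (t : Nat) : ∀ (cnt : Nat)
    (D : PySem.Dict Int (PySem.Dict String (List Int))) (dv : Int) (d : PySem.Dict String (List Int)),
    cnt + t ≤ L.length →
    (PySem.List.pyRange 0 ((t : Nat) : Int) 1).foldl
      (fun st2 _i =>
        let pt := PySem.List.pyGetD L st2.2 ("", [])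
        (st2.1.modify dv PySem.Dict.empty (fun inner => inner.insert pt.1 pt.2), st2.2 + 1))
      (D.insert dv d, ((cnt : Nat) : Int))
    = (D.insert dv (((L.drop cnt).take t).foldl (fun dd p => dd.insert p.1 p.2) d),
        (((cnt + t : Nat)) : Int)) := by
  induction t with
  | zero =>
    intro cnt D dv d hb
    simp [PySem.List.pyRange_one_eq_nil]
  | succ t ih =>
    intro cnt D dv d hb
    have hcast : (((t + 1 : Nat)) : Int) = ((t : Nat) : Int) + 1 := by push_cast; ring
    rw [hcast, PySem.List.pyRange_one_succ_right (by positivity), List.foldl_append,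
      ih cnt D dv d (by omega)]
    have hidx : cnt + t < L.length := by omega
    simp only [List.foldl_cons, List.foldl_nil]
    have hpt : PySem.List.pyGetD L (((cnt + t : Nat)) : Int) ("", []) = L[cnt + t] := by
      rw [PySem.List.pyGetD_natCast, List.getD_eq_getElem _ _ hidx]
    rw [hpt]
    have htake : (L.drop cnt).take (t + 1)
        = (L.drop cnt).take t ++ [L[cnt + t]] := by
      rw [List.take_add_one]
      have : (L.drop cnt)[t]? = some L[cnt + t] := by
        rw [List.getElem?_drop]
        exact List.getElem?_eq_getElem hidx
      simp [this]
    rw [htake, List.foldl_append]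
    simp only [List.foldl_cons, List.foldl_nil]
    rw [PySem.Dict.modify, PySem.Dict.getD_insert_self, PySem.Dict.insert_insert_self,
      Prod.mk.injEq]
    exact ⟨rfl, by push_cast; ring⟩

theorem pvRangeNorm (z : Int) :
    PySem.List.pyRange 0 z 1 = PySem.List.pyRange 0 ((z.toNat : Nat) : Int) 1 := by
  rw [PySem.List.pyRange_one, PySem.List.pyRange_one]
  congr 2
  omega

theorem pvDivLoop (L : List (String × List Int)) :
    ∀ (ds : List Int) (s : Int) (cnt : Nat)
      (D : PySem.Dict Int (PySem.Dict String (List Int))) (acc : List (Int × List (String × List Int))),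
    ((cnt : Int) + (ds.map (fun z => max z 0)).sum ≤ (L.length : Int)) →
    (∀ r ∈ D.keys, r < s) →
    D.items.map (fun p => (p.1, p.2.items)) = acc →
    ((PySem.List.enumerate ds s).foldl
        (fun (st : PySem.Dict Int (PySem.Dict String (List Int)) × Int) p =>
          (PySem.List.pyRange 0 p.2 1).foldl
            (fun st2 _i =>
              let pt := PySem.List.pyGetD L st2.2 ("", [])
              (st2.1.modify p.1 PySem.Dict.empty (fun inner => inner.insert pt.1 pt.2), st2.2 + 1))
            (st.1.insert p.1 PySem.Dict.empty, st.2))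
        (D, (cnt : Int))).1.items.map (fun p => (p.1, p.2.items))
      = ((PySem.List.enumerate ds s).foldl
          (fun (st : List (Int × List (String × List Int)) × Nat) dsp =>
            let chunk := (L.drop st.2).take dsp.2.toNat
            (st.1 ++ [(dsp.1, (PySem.Dict.ofList chunk).items)], st.2 + dsp.2.toNat))
          (acc, cnt)).1 := by
  intro ds
  induction ds with
  | nil =>
    intro s cnt D acc _ _ hitems
    simpa [PySem.List.enumerate_nil] using hitems
  | cons z rest ih =>
    intro s cnt D acc hb hkeys hitems
    rw [PySem.List.enumerate_cons, List.foldl_cons, List.foldl_cons]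
    set t : Nat := z.toNat with ht
    have hmax : max z 0 = ((t : Nat) : Int) := by rw [ht, Int.toNat_eq_max]
    have hsum : (0 : Int) ≤ (rest.map (fun z => max z 0)).sum :=
      List.sum_nonneg (by intro a ha; rcases List.mem_map.mp ha with ⟨b, _, hb'⟩; omega)
    have hbt : cnt + t ≤ L.length := by
      rw [List.map_cons, List.sum_cons, hmax] at hb
      omega
    -- A-side head step
    rw [pvRangeNorm z, pvInnerLoop L t cnt D s PySem.Dict.empty hbt]
    have hcont : D.contains s = false := by
      rw [← Bool.not_eq_true]
      intro h
      exact absurd (hkeys s ((PySem.Dict.contains_iff_mem_keys D s).mp h)) (lt_irrefl s)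
    have hofl : PySem.Dict.ofList ((L.drop cnt).take t)
        = ((L.drop cnt).take t).foldl (fun dd p => dd.insert p.1 p.2) PySem.Dict.empty := rfl
    apply ih (s + 1) (cnt + t) (D.insert s (PySem.Dict.ofList ((L.drop cnt).take t)))
    · rw [List.map_cons, List.sum_cons, hmax] at hb
      push_cast
      omega
    · intro r hr
      rcases (PySem.Dict.mem_keys_insert _ _ _ _).mp hr with h | h
      · omega
      · have := hkeys r h; omega
    · rw [hofl, PySem.Dict.items_insert_of_not_contains _ _ hcont, List.map_append, hitems]
      simp

-- ===== VERDICT (by name: the statement is the Claim_ definition above) =====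
theorem create_divisions_spec : Claim_equal_create_divisions := by
  intro pd ds _ hpre
  show create_divisions pd ds = create_divisions_alt pd ds
  simp only [create_divisions, create_divisions_alt]
  rw [pvOrderedA pd]
  have hAouter :
      (PySem.List.pyRange 0 (PySem.List.len ds) 1).foldl
        (fun (st : PySem.Dict Int (PySem.Dict String (List Int)) × Int) div =>
          (PySem.List.pyRange 0 (PySem.List.pyGetD ds div 0) 1).foldl
            (fun st2 _i =>
              let pt := PySem.List.pyGetD (PySem.List.sorted pd pvRating false) st2.2 ("", [])
              (st2.1.modify div PySem.Dict.empty (fun inner => inner.insert pt.1 pt.2), st2.2 + 1))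
            (st.1.insert div PySem.Dict.empty, st.2))
        (PySem.Dict.empty, 0)
      = (PySem.List.enumerate ds).foldl
          (fun (st : PySem.Dict Int (PySem.Dict String (List Int)) × Int) p =>
            (PySem.List.pyRange 0 p.2 1).foldl
              (fun st2 _i =>
                let pt := PySem.List.pyGetD (PySem.List.sorted pd pvRating false) st2.2 ("", [])
                (st2.1.modify p.1 PySem.Dict.empty (fun inner => inner.insert pt.1 pt.2), st2.2 + 1))
              (st.1.insert p.1 PySem.Dict.empty, st.2))
          (PySem.Dict.empty, 0) := by
    rw [PySem.List.enumerate_eq_map_pyRange ds 0, List.foldl_map]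
  rw [hAouter]
  have hmain := pvDivLoop (PySem.List.sorted pd pvRating false) ds 0 0 PySem.Dict.empty []
    (by
      rw [PySem.List.length_sorted]
      push_cast
      simpa using hpre.2.2)
    (by simp [PySem.Dict.keys_empty])
    (by simp [PySem.Dict.empty])
  push_cast at hmain
  exact hmain
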